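-- pv_equiv track=rewrite | github.com/RoundSann/RoundSann.github.io | source/_posts/Games/苍色之光与魔剑锻造师/衰减计算器.py | effect_count_tool
-- ===== SOURCE A (Python) =====
-- def effect_count_tool(number, pw, onelimit, twolimit, threelimit):
--     """精确复刻 AS_ItemCode.js Window_Forge.prototype.effectCountTool"""
--     plus = 1
--     c = 0
--     pw = max(pw - 1, 1)
--     for _ in range(number + 1):
--         c += 1
--         if plus >= threelimit[0]:
--             if c >= threelimit[1]:
--                 plus += 1; c = 0
--         elif plus >= twolimit[0]:
--             if c >= twolimit[1]:
--                 plus += 1; c = 0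
--         elif plus >= onelimit[0]:
--             if c >= onelimit[1]:
--                 plus += 1; c = 0
--         else:
--             if c >= pw:
--                 plus += 1; c = 0
--     return plus
-- ===== SOURCE B (Python) =====
-- def effect_count_tool(number, pw, onelimit, twolimit, threelimit):
--     """Batched computation: within each constant-threshold regime each +1 of plus
--     costs a fixed number of ticks, so the increments come from one integer
--     division per regime instead of simulating every tick."""
--     pw2 = max(pw - 1, 1)
--     remaining = number + 1
--     plus = 1
--     if remaining <= 0:
--         return plus
--
--     def threshold(p):
--         if p >= threelimit[0]:
--             t = threelimit[1]
--         elif p >= twolimit[0]: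
--             t = twolimit[1]
--         elif p >= onelimit[0]:
--             t = onelimit[1]
--         else:
--             t = pw2
--         return max(t, 1)
--
--     boundaries = sorted(b for b in (onelimit[0], twolimit[0], threelimit[0]) if b > plus)
--     for b in boundaries:
--         t = threshold(plus)
--         k = b - plus
--         m = remaining // t
--         if m < k:
--             return plus + m
--         plus += k
--         remaining -= k * t
--     return plus + remaining // threshold(plus)
-- ===== Notes on version B (the rewrite author's own statement) =====
-- stated objective: alternative
-- what changed: Replaces the tick-by-tick simulation of number+1 counter steps by a batched computation: within each constant-threshold regime (delimited by the sorted limit boundaries) every increment of plus costs a fixed number of ticks, so the increments are obtained by one integer division per regime (at most 4 regimes) instead of a loop over number.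
-- outside the precondition, e.g. on effect_count_tool(2, 2505, [], [0, 0, -1, -8042, 3], [-2, 2, 6]): A returns 2, B raises IndexError; on effect_count_tool(5, 3, [100], [100], [100]): A returns 4, B returns 4
import Mathlib
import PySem

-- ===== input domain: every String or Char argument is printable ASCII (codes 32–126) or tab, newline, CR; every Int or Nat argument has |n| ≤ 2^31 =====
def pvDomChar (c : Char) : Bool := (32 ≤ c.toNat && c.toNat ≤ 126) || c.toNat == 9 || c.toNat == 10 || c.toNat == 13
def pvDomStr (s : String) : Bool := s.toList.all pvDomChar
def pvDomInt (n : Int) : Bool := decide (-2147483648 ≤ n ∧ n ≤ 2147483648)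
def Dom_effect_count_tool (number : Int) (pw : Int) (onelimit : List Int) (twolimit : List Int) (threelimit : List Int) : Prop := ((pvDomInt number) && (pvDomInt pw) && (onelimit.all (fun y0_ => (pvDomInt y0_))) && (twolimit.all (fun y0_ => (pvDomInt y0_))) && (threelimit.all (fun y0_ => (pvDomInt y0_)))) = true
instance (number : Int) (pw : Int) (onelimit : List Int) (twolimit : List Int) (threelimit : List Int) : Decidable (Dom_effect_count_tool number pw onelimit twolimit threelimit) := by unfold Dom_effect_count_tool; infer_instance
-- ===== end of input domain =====

-- B replaces A's tick-by-tick loop over number+1 steps with a batched alternative: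
-- one integer division per constant-threshold regime (at most four regimes).

-- ===== PORT A =====
-- Literal transliteration of A: fold the loop body over range(number+1) with state (plus, c).
-- list[i] is ported as (pyGet? · i).getD 0; Pre_ guarantees the index is in range whenever
-- the loop body actually runs, so the default is never the value of an admitted input.
def effect_count_tool (number : Int) (pw : Int) (onelimit : List Int) (twolimit : List Int) (threelimit : List Int) : Int :=
  let pw2 := max (pw - 1) 1
  (((List.range (number + 1).toNat).foldl (fun (s : Int × Int) _ =>
      let plus := s.1
      let c := s.2 + 1
      if plus ≥ (PySem.List.pyGet? threelimit 0).getD 0 then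
        (if c ≥ (PySem.List.pyGet? threelimit 1).getD 0 then (plus + 1, 0) else (plus, c))
      else if plus ≥ (PySem.List.pyGet? twolimit 0).getD 0 then
        (if c ≥ (PySem.List.pyGet? twolimit 1).getD 0 then (plus + 1, 0) else (plus, c))
      else if plus ≥ (PySem.List.pyGet? onelimit 0).getD 0 then
        (if c ≥ (PySem.List.pyGet? onelimit 1).getD 0 then (plus + 1, 0) else (plus, c))
      else
        (if c ≥ pw2 then (plus + 1, 0) else (plus, c)))
    ((1 : Int), (0 : Int)))).1

-- ===== PORT B =====
-- Source B's helper threshold(p): the (effective, ≥ 1) step cost of one plus-increment at level p.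
def pvThreshold (pw2 : Int) (onelimit : List Int) (twolimit : List Int) (threelimit : List Int) (p : Int) : Int :=
  let t :=
    if p ≥ (PySem.List.pyGet? threelimit 0).getD 0 then (PySem.List.pyGet? threelimit 1).getD 0
    else if p ≥ (PySem.List.pyGet? twolimit 0).getD 0 then (PySem.List.pyGet? twolimit 1).getD 0
    else if p ≥ (PySem.List.pyGet? onelimit 0).getD 0 then (PySem.List.pyGet? onelimit 1).getD 0
    else pw2
  max t 1

-- Source B's 'for b in boundaries' loop with its early return, as structural recursion over bs.
def pvRegimes (pw2 : Int) (onelimit : List Int) (twolimit : List Int) (threelimit : List Int) :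
    List Int → Int → Int → Int
  | [], plus, remaining =>
      plus + PySem.Int.floordiv remaining (pvThreshold pw2 onelimit twolimit threelimit plus)
  | b :: rest, plus, remaining =>
      let t := pvThreshold pw2 onelimit twolimit threelimit plus
      let k := b - plus
      let m := PySem.Int.floordiv remaining t
      if m < k then plus + m
      else pvRegimes pw2 onelimit twolimit threelimit rest (plus + k) (remaining - k * t)

def effect_count_tool_alt (number : Int) (pw : Int) (onelimit : List Int) (twolimit : List Int) (threelimit : List Int) : Int :=
  let pw2 := max (pw - 1) 1
  let remaining := number + 1
  let plus : Int := 1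
  if remaining ≤ 0 then plus
  else
    let boundaries := PySem.List.sorted
      (([(PySem.List.pyGet? onelimit 0).getD 0, (PySem.List.pyGet? twolimit 0).getD 0,
         (PySem.List.pyGet? threelimit 0).getD 0]).filter (fun b => plus < b)) (fun x => x) false
    pvRegimes pw2 onelimit twolimit threelimit boundaries plus remaining

-- ===== PRECONDITION & SPEC =====
-- Pre_ excludes the inputs on which Python A's loop body indexes a limit list that is too
-- short (IndexError). Which of the six entries are actually read depends on the levels the
-- simulation reaches, so Pre_ conservatively requires all three lists to have both entries
-- whenever the loop runs at all; this excludes some inputs on which A still returns (e.g.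
-- all three limits unreachably large with length-1 lists) — see claim.json "cites".
def Pre_effect_count_tool (number : Int) (pw : Int) (onelimit : List Int) (twolimit : List Int) (threelimit : List Int) : Prop :=
  number + 1 ≤ 0 ∨ (2 ≤ onelimit.length ∧ 2 ≤ twolimit.length ∧ 2 ≤ threelimit.length)
instance (number : Int) (pw : Int) (onelimit : List Int) (twolimit : List Int) (threelimit : List Int) : Decidable (Pre_effect_count_tool number pw onelimit twolimit threelimit) := by unfold Pre_effect_count_tool; infer_instance

def pvWitness_effect_count_tool : Int × Int × List Int × List Int × List Int :=
  (30, 3, [2, 2], [4, 3], [6, 4])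

def Spec_effect_count_tool (number : Int) (pw : Int) (onelimit : List Int) (twolimit : List Int) (threelimit : List Int) (out : Int) : Prop := out = effect_count_tool_alt number pw onelimit twolimit threelimit
instance (number : Int) (pw : Int) (onelimit : List Int) (twolimit : List Int) (threelimit : List Int) (out : Int) : Decidable (Spec_effect_count_tool number pw onelimit twolimit threelimit out) := by unfold Spec_effect_count_tool; infer_instance

-- ===== CLAIM (what is proved, stated in full; the proofs are below) =====
def Claim_equal_effect_count_tool : Prop := ∀ (number : Int) (pw : Int) (onelimit : List Int) (twolimit : List Int) (threelimit : List Int), Dom_effect_count_tool number pw onelimit twolimit threelimit → Pre_effect_count_tool number pw onelimit twolimit threelimit → Spec_effect_count_tool number pw onelimit twolimit threelimit (effect_count_tool number pw onelimit twolimit threelimit)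

-- ===== LEMMAS AND PROOFS =====

-- A's loop body as a named function (proof-side only).
def pvStep (pw2 : Int) (onelimit : List Int) (twolimit : List Int) (threelimit : List Int) (s : Int × Int) : Int × Int :=
  let plus := s.1
  let c := s.2 + 1
  if plus ≥ (PySem.List.pyGet? threelimit 0).getD 0 then
    (if c ≥ (PySem.List.pyGet? threelimit 1).getD 0 then (plus + 1, 0) else (plus, c))
  else if plus ≥ (PySem.List.pyGet? twolimit 0).getD 0 then
    (if c ≥ (PySem.List.pyGet? twolimit 1).getD 0 then (plus + 1, 0) else (plus, c))
  else if plus ≥ (PySem.List.pyGet? onelimit 0).getD 0 then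
    (if c ≥ (PySem.List.pyGet? onelimit 1).getD 0 then (plus + 1, 0) else (plus, c))
  else
    (if c ≥ pw2 then (plus + 1, 0) else (plus, c))

theorem pvT_pos (pw2 : Int) (l1 l2 l3 : List Int) (p : Int) :
    1 ≤ pvThreshold pw2 l1 l2 l3 p := by
  unfold pvThreshold; exact le_max_right _ _

-- Per-increment specification: pvG n p advances p by one each time n still holds a full
-- threshold's worth of ticks.
def pvG (pw2 : Int) (l1 l2 l3 : List Int) (n : Nat) (p : Int) : Int :=
  let t := pvThreshold pw2 l1 l2 l3 p
  if t ≤ (n : Int) then pvG pw2 l1 l2 l3 (n - t.toNat) (p + 1) else p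
termination_by n
decreasing_by
  have h1 := pvT_pos pw2 l1 l2 l3 p
  omega

theorem pvStep_eq (pw2 : Int) (l1 l2 l3 : List Int) (p c : Int) (hc : 0 ≤ c) :
    pvStep pw2 l1 l2 l3 (p, c) =
      if pvThreshold pw2 l1 l2 l3 p ≤ c + 1 then (p + 1, 0) else (p, c + 1) := by
  unfold pvStep pvThreshold
  dsimp only
  split_ifs <;> first | rfl | omega

theorem pvRun_partial (pw2 : Int) (l1 l2 l3 : List Int) (p : Int) :
    ∀ (j : Nat), (j : Int) < pvThreshold pw2 l1 l2 l3 p →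
      (pvStep pw2 l1 l2 l3)^[j] (p, 0) = (p, (j : Int)) := by
  intro j
  induction j with
  | zero => intro _; simp
  | succ j ih =>
      intro hj
      rw [Function.iterate_succ_apply', ih (by push_cast at hj ⊢; omega)]
      rw [pvStep_eq pw2 l1 l2 l3 p (j : Int) (by positivity)]
      rw [if_neg (by push_cast at hj ⊢; omega)]
      push_cast; ring_nf

theorem pvRun_full (pw2 : Int) (l1 l2 l3 : List Int) (p : Int) :
    (pvStep pw2 l1 l2 l3)^[(pvThreshold pw2 l1 l2 l3 p).toNat] (p, 0) = (p + 1, 0) := by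
  have ht := pvT_pos pw2 l1 l2 l3 p
  set t := pvThreshold pw2 l1 l2 l3 p with hT
  obtain ⟨j, hj⟩ : ∃ j : Nat, t.toNat = j + 1 := ⟨t.toNat - 1, by omega⟩
  rw [hj, Function.iterate_succ_apply',
      pvRun_partial pw2 l1 l2 l3 p j (by rw [← hT]; omega),
      pvStep_eq pw2 l1 l2 l3 p (j : Int) (by positivity)]
  rw [if_pos (by rw [← hT]; omega)]

theorem pvRun_eq_G (pw2 : Int) (l1 l2 l3 : List Int) :
    ∀ (n : Nat) (p : Int),
      ((pvStep pw2 l1 l2 l3)^[n] (p, 0)).1 = pvG pw2 l1 l2 l3 n p := by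
  intro n
  induction n using Nat.strong_induction_on with
  | _ n ih =>
      intro p
      have ht := pvT_pos pw2 l1 l2 l3 p
      rw [pvG]
      by_cases h : pvThreshold pw2 l1 l2 l3 p ≤ (n : Int)
      · rw [if_pos h]
        have hiter : (pvStep pw2 l1 l2 l3)^[n] ((p : Int), (0 : Int)) =
            (pvStep pw2 l1 l2 l3)^[n - (pvThreshold pw2 l1 l2 l3 p).toNat]
              ((pvStep pw2 l1 l2 l3)^[(pvThreshold pw2 l1 l2 l3 p).toNat] (p, 0)) := by
          rw [← Function.iterate_add_apply]
          congr 1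
          omega
        rw [hiter, pvRun_full pw2 l1 l2 l3 p]
        exact ih (n - (pvThreshold pw2 l1 l2 l3 p).toNat) (by omega) (p + 1)
      · rw [if_neg h]
        rw [pvRun_partial pw2 l1 l2 l3 p n (by omega)]

-- k full increments inside a constant-threshold stretch.
theorem pvG_advance (pw2 : Int) (l1 l2 l3 : List Int) (t : Int) :
    ∀ (k : Nat) (n : Nat) (p : Int),
      (∀ q : Int, p ≤ q → q < p + (k : Int) → pvThreshold pw2 l1 l2 l3 q = t) →
      (k : Int) * t ≤ (n : Int) →
      pvG pw2 l1 l2 l3 n p = pvG pw2 l1 l2 l3 (n - k * t.toNat) (p + (k : Int)) := by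
  intro k
  induction k with
  | zero => intro n p _ _; simp
  | succ k ih =>
      intro n p hconst hn
      have ht : pvThreshold pw2 l1 l2 l3 p = t := hconst p le_rfl (by omega)
      have htpos' : 1 ≤ t := ht ▸ pvT_pos pw2 l1 l2 l3 p
      have hexp : ((k : Nat) + 1 : Int) * t = (k : Int) * t + t := by ring
      have hn' : (k : Int) * t + t ≤ (n : Int) := by push_cast at hn; rw [hexp] at hn; exact hn
      have hkt0 : (0:Int) ≤ (k : Int) * t := by positivity
      have hle : t ≤ (n : Int) := by linarith
      have hcast : ((n - t.toNat : Nat) : Int) = (n : Int) - t := by omega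
      rw [pvG, if_pos (ht ▸ hle), ht]
      rw [ih (n - t.toNat) (p + 1)
          (fun q hq1 hq2 => hconst q (by omega) (by omega))
          (by rw [hcast]; linarith)]
      have e2 : (k + 1) * t.toNat = k * t.toNat + t.toNat := by ring
      congr 1
      · omega
      · push_cast; ring
  
-- Unbounded constant-threshold tail: closed form by division.
theorem pvG_final (pw2 : Int) (l1 l2 l3 : List Int) (t : Int) :
    ∀ (n : Nat) (p : Int),
      (∀ q : Int, p ≤ q → pvThreshold pw2 l1 l2 l3 q = t) →
      pvG pw2 l1 l2 l3 n p = p + ((n / t.toNat : Nat) : Int) := by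
  intro n
  induction n using Nat.strong_induction_on with
  | _ n ih =>
      intro p hconst
      have ht : pvThreshold pw2 l1 l2 l3 p = t := hconst p le_rfl
      have htpos : 1 ≤ t := ht ▸ pvT_pos pw2 l1 l2 l3 p
      rw [pvG]
      by_cases h : pvThreshold pw2 l1 l2 l3 p ≤ (n : Int)
      · rw [if_pos h, ht]
        have hge : t.toNat ≤ n := by rw [ht] at h; omega
        rw [ih (n - t.toNat) (by omega) (p + 1)
            (fun q hq => hconst q (by omega))]
        have hd : n / t.toNat = (n - t.toNat) / t.toNat + 1 := by
          rw [Nat.div_eq n t.toNat, if_pos ⟨by omega, hge⟩]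
        rw [hd, Nat.cast_add, Nat.cast_one]; ring
      · rw [if_neg h]
        have hlt : n < t.toNat := by rw [ht] at h; omega
        rw [Nat.div_eq_of_lt hlt, Nat.cast_zero, add_zero]

-- Bounded constant-threshold stretch where the ticks run out before the boundary.
theorem pvG_stop (pw2 : Int) (l1 l2 l3 : List Int) (t : Int) :
    ∀ (n : Nat) (k : Nat) (p : Int),
      (∀ q : Int, p ≤ q → q < p + (k : Int) → pvThreshold pw2 l1 l2 l3 q = t) →
      n / t.toNat < k →
      pvG pw2 l1 l2 l3 n p = p + ((n / t.toNat : Nat) : Int) := by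
  intro n
  induction n using Nat.strong_induction_on with
  | _ n ih =>
      intro k p hconst hdiv
      have hk : 1 ≤ k := Nat.one_le_iff_ne_zero.mpr (by rintro rfl; exact Nat.not_lt_zero _ hdiv)
      have ht : pvThreshold pw2 l1 l2 l3 p = t := hconst p le_rfl (by omega)
      have htpos : 1 ≤ t := ht ▸ pvT_pos pw2 l1 l2 l3 p
      rw [pvG]
      by_cases h : pvThreshold pw2 l1 l2 l3 p ≤ (n : Int)
      · rw [if_pos h, ht]
        have hge : t.toNat ≤ n := by rw [ht] at h; omega
        have hdstep : n / t.toNat = (n - t.toNat) / t.toNat + 1 := by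
          rw [Nat.div_eq n t.toNat, if_pos ⟨by omega, hge⟩]
        have hk2 : 2 ≤ k := by
          generalize hx : (n - t.toNat) / t.toNat = x at hdstep
          generalize hy : n / t.toNat = y at hdiv hdstep
          omega
        rw [ih (n - t.toNat) (by omega) (k - 1) (p + 1)
            (fun q hq1 hq2 => hconst q (by omega) (by omega))
            (by generalize hx : (n - t.toNat) / t.toNat = x at hdstep
                generalize hy : n / t.toNat = y at hdstep hdiv
                omega)]
        rw [hdstep, Nat.cast_add, Nat.cast_one]; ring
      · rw [if_neg h]
        have hlt : n < t.toNat := by rw [ht] at h; omega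
        rw [Nat.div_eq_of_lt hlt, Nat.cast_zero, add_zero]

theorem pvFloordiv_toNat (r t : Int) (hr : 0 ≤ r) (ht : 1 ≤ t) :
    PySem.Int.floordiv r t = ((r.toNat / t.toNat : Nat) : Int) := by
  rw [PySem.Int.floordiv_eq_ediv_of_pos (by omega)]
  rw [Int.natCast_div]
  rw [Int.toNat_of_nonneg hr, Int.toNat_of_nonneg (by omega : (0:Int) ≤ t)]

theorem pvRegimes_eq_G (pw2 : Int) (l1 l2 l3 : List Int) :
    ∀ (bs : List Int) (p r : Int), 0 ≤ r →
      bs.Pairwise (· ≤ ·) →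
      (∀ b ∈ bs, p ≤ b) →
      ((PySem.List.pyGet? l1 0).getD 0 ≤ p ∨ (PySem.List.pyGet? l1 0).getD 0 ∈ bs) →
      ((PySem.List.pyGet? l2 0).getD 0 ≤ p ∨ (PySem.List.pyGet? l2 0).getD 0 ∈ bs) →
      ((PySem.List.pyGet? l3 0).getD 0 ≤ p ∨ (PySem.List.pyGet? l3 0).getD 0 ∈ bs) →
      pvRegimes pw2 l1 l2 l3 bs p r = pvG pw2 l1 l2 l3 r.toNat p := by
  intro bs
  induction bs with
  | nil =>
      intro p r hr _ _ h1 h2 h3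
      simp only [List.not_mem_nil, or_false] at h1 h2 h3
      have hconst : ∀ q : Int, p ≤ q → pvThreshold pw2 l1 l2 l3 q = pvThreshold pw2 l1 l2 l3 p := by
        intro q hq; unfold pvThreshold; dsimp only; split_ifs <;> first | rfl | omega
      rw [pvRegimes, pvG_final pw2 l1 l2 l3 (pvThreshold pw2 l1 l2 l3 p) r.toNat p hconst]
      rw [pvFloordiv_toNat r _ hr (pvT_pos pw2 l1 l2 l3 p)]
  | cons b rest ih =>
      intro p r hr hsort hge h1 h2 h3
      have hb : p ≤ b := hge b (List.mem_cons_self)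
      have hrest : ∀ x ∈ rest, b ≤ x := fun x hx => (List.pairwise_cons.mp hsort).1 x hx
      have hb1 : (PySem.List.pyGet? l1 0).getD 0 ≤ p ∨ b ≤ (PySem.List.pyGet? l1 0).getD 0 := by
        rcases h1 with h | h
        · exact Or.inl h
        · rcases List.mem_cons.mp h with h | h
          · omega
          · exact Or.inr (hrest _ h)
      have hb2 : (PySem.List.pyGet? l2 0).getD 0 ≤ p ∨ b ≤ (PySem.List.pyGet? l2 0).getD 0 := by
        rcases h2 with h | h
        · exact Or.inl h
        · rcases List.mem_cons.mp h with h | h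
          · omega
          · exact Or.inr (hrest _ h)
      have hb3 : (PySem.List.pyGet? l3 0).getD 0 ≤ p ∨ b ≤ (PySem.List.pyGet? l3 0).getD 0 := by
        rcases h3 with h | h
        · exact Or.inl h
        · rcases List.mem_cons.mp h with h | h
          · omega
          · exact Or.inr (hrest _ h)
      have hconst : ∀ q : Int, p ≤ q → q < b → pvThreshold pw2 l1 l2 l3 q = pvThreshold pw2 l1 l2 l3 p := by
        intro q hq1 hq2; unfold pvThreshold; dsimp only; split_ifs <;> first | rfl | omega
      generalize hT : pvThreshold pw2 l1 l2 l3 p = t at hconst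
      have htpos : 1 ≤ t := hT ▸ pvT_pos pw2 l1 l2 l3 p
      have hdiv := pvFloordiv_toNat r t hr htpos
      have hbp : ((b - p).toNat : Int) = b - p := by omega
      have htn : ((t.toNat : Nat) : Int) = t := by omega
      simp only [pvRegimes]
      rw [hT, hdiv]
      by_cases hm : ((r.toNat / t.toNat : Nat) : Int) < b - p
      · rw [if_pos hm]
        rw [pvG_stop pw2 l1 l2 l3 t r.toNat (b - p).toNat p
            (fun q hq1 hq2 => hconst q hq1 (by omega))
            (by generalize hq : r.toNat / t.toNat = q at hm ⊢; omega)]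
      · rw [if_neg hm]
        rw [not_lt] at hm
        have hk : (0:Int) ≤ b - p := by omega
        have hmul : (b - p) * t ≤ r := by
          have hmod := PySem.Int.floordiv_mul_add_mod r t
          have hmodpos : 0 ≤ PySem.Int.mod r t := by
            rw [PySem.Int.mod_eq_emod_of_pos (by omega)]
            exact Int.emod_nonneg r (by omega)
          have hle : PySem.Int.floordiv r t * t ≤ r := by omega
          rw [hdiv] at hle
          nlinarith
        have hprod : (((b - p).toNat * t.toNat : Nat) : Int) = (b - p) * t := by
          push_cast
          rw [hbp, htn]
        rw [pvG_advance pw2 l1 l2 l3 t (b - p).toNat r.toNat p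
            (fun q hq1 hq2 => hconst q hq1 (by omega))
            (by rw [hbp, Int.toNat_of_nonneg hr]; exact hmul)]
        have e1 : r.toNat - (b - p).toNat * t.toNat = (r - (b - p) * t).toNat := by omega
        have e2 : p + ((b - p).toNat : Int) = p + (b - p) := by rw [hbp]
        rw [e1, e2]
        rw [ih (p + (b - p)) (r - (b - p) * t) (by omega)
            (List.pairwise_cons.mp hsort).2
            (fun x hx => by have := hrest x hx; omega)
            ?_ ?_ ?_]
        · rcases hb1 with h | h
          · exact Or.inl (by omega)
          · rcases h1 with h' | h'
            · exact Or.inl (by omega)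
            · rcases List.mem_cons.mp h' with h' | h'
              · exact Or.inl (by omega)
              · exact Or.inr h'
        · rcases hb2 with h | h
          · exact Or.inl (by omega)
          · rcases h2 with h' | h'
            · exact Or.inl (by omega)
            · rcases List.mem_cons.mp h' with h' | h'
              · exact Or.inl (by omega)
              · exact Or.inr h'
        · rcases hb3 with h | h
          · exact Or.inl (by omega)
          · rcases h3 with h' | h'
            · exact Or.inl (by omega)
            · rcases List.mem_cons.mp h' with h' | h'
              · exact Or.inl (by omega)
              · exact Or.inr h'

theorem pvA_eq_iterate (number pw : Int) (l1 l2 l3 : List Int) :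
    effect_count_tool number pw l1 l2 l3 =
      ((pvStep (max (pw - 1) 1) l1 l2 l3)^[(number + 1).toNat] ((1:Int), (0:Int))).1 := by
  show (((List.range (number + 1).toNat).foldl
      (fun (s : Int × Int) _ => pvStep (max (pw - 1) 1) l1 l2 l3 s) ((1:Int), (0:Int)))).1 = _
  congr 1
  generalize (number + 1).toNat = n
  induction n with
  | zero => rfl
  | succ n ih =>
      rw [List.range_succ, List.foldl_append, ih, Function.iterate_succ_apply']
      rfl

-- ===== VERDICT (by name: the statement is the Claim_ definition above) =====
theorem effect_count_tool_spec : Claim_equal_effect_count_tool := by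
  intro number pw l1 l2 l3 _ _
  unfold Spec_effect_count_tool
  rw [pvA_eq_iterate]
  unfold effect_count_tool_alt
  by_cases h0 : number + 1 ≤ 0
  · rw [if_pos h0]
    have : (number + 1).toNat = 0 := by omega
    rw [this]; simp
  · rw [if_neg h0]
    rw [pvRun_eq_G]
    set pw2 := max (pw - 1) 1
    set L1 := (PySem.List.pyGet? l1 0).getD 0
    set L2 := (PySem.List.pyGet? l2 0).getD 0
    set L3 := (PySem.List.pyGet? l3 0).getD 0
    have hperm : (PySem.List.sorted (([L1, L2, L3]).filter (fun b => (1:Int) < b)) (fun x => x) false).Perm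
        (([L1, L2, L3]).filter (fun b => (1:Int) < b)) := PySem.List.sorted_perm _ _ _
    have hmem : ∀ x, x ∈ PySem.List.sorted (([L1, L2, L3]).filter (fun b => (1:Int) < b)) (fun x => x) false ↔
        x ∈ ([L1, L2, L3]).filter (fun b => (1:Int) < b) := fun x => hperm.mem_iff
    rw [pvRegimes_eq_G pw2 l1 l2 l3 _ 1 (number + 1) (by omega)
        (PySem.List.sorted_pairwise _ _)
        ?_ ?_ ?_ ?_]
    · intro b hb
      have := (hmem b).mp hb
      have := (List.mem_filter.mp this).2
      simp at this; omega
    · by_cases h : L1 ≤ 1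
      · exact Or.inl h
      · refine Or.inr ((hmem L1).mpr (List.mem_filter.mpr ⟨by simp, by simp; omega⟩))
    · by_cases h : L2 ≤ 1
      · exact Or.inl h
      · refine Or.inr ((hmem L2).mpr (List.mem_filter.mpr ⟨by simp, by simp; omega⟩))
    · by_cases h : L3 ≤ 1
      · exact Or.inl h
      · refine Or.inr ((hmem L3).mpr (List.mem_filter.mpr ⟨by simp, by simp; omega⟩))
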